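-- pv_equiv track=rewrite | github.com/navsuresh/cppMiniCompiler | DCE/dce.py | process
-- ===== SOURCE A (Python) =====
-- from collections import Counter
--
-- def process(icg,label):
-- 	all_tokens=[]
-- 	for i in range(len(icg)):
-- 		all_tokens+=icg[i]
-- 	keywords={'not','if','goto',':','=','<','>'	}.union(label)
-- 	for i in range(len(all_tokens)):
-- 		if(all_tokens[i].isdigit()==1):
-- 			all_tokens[i]=':'
--
-- 	for i in keywords:
-- 		while(i in all_tokens):
-- 			all_tokens.remove(i)
--
-- 	counts=dict(Counter(all_tokens))
-- 	if(len(list(counts.values()))==0 or min(list(counts.values()))>1):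
-- 		return None
-- 	return counts
-- ===== SOURCE B (Python) =====
-- from collections import Counter
--
-- def process(icg, label):
--     counts = dict(Counter(':' if t.isdigit() else t for row in icg for t in row))
--     for kw in {'not', 'if', 'goto', ':', '=', '<', '>'}.union(label):
--         counts.pop(kw, None)
--     if not counts or min(counts.values()) > 1:
--         return None
--     return counts
-- ===== Notes on version B (the rewrite author's own statement) =====
-- stated objective: faster
-- what changed: A repeatedly scans and mutates the flattened token list (while kw in list: list.remove(kw)) and only then counts; B builds the Counter over all (digit-folded) tokens first and then deletes each keyword key once with counts.pop, so the quadratic remove-scan loop disappears.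
import Mathlib
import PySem

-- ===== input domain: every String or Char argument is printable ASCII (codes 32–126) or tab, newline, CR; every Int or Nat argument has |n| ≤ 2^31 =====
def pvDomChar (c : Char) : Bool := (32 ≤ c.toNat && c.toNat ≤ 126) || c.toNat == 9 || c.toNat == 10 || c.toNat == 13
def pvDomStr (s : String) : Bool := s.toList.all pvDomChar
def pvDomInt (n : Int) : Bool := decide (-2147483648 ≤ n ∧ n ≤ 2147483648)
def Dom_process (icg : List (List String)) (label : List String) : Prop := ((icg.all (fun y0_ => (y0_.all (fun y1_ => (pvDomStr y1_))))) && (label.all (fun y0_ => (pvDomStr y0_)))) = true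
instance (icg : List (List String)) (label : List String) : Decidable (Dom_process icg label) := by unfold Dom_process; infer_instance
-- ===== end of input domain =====

-- B replaces A's filter-the-token-list-by-repeated-remove-then-count with count-first-then-delete-keyword-keys: simpler, one counting pass and one pop per keyword.

-- ===== PORT A =====
-- 'while i in all_tokens: all_tokens.remove(i)' — repeated first-occurrence removal until absent
def pvWhileRemove (xs : List String) (kw : String) : List String :=
  match h : PySem.List.remove? xs kw with
  | none => xs
  | some ys => pvWhileRemove ys kw
termination_by xs.length
decreasing_by
  have hmem : kw ∈ xs := by
    by_contra hn
    rw [(PySem.List.remove?_eq_none_iff xs kw).mpr hn] at h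
    simp at h
  rw [PySem.List.remove?_eq_some_erase xs kw hmem] at h
  cases h
  have h1 : 0 < xs.length := List.length_pos_of_mem hmem
  have h2 := List.length_erase_of_mem hmem
  omega

def process (icg : List (List String)) (label : List String) : Option (List (String × Int)) :=
  let all_tokens := (PySem.List.pyRange 0 (PySem.List.len icg)).foldl
      (fun acc i => acc ++ PySem.List.pyGetD icg i []) []
  let keywords : PySem.Set String :=
      PySem.Set.union (PySem.Set.ofList ["not", "if", "goto", ":", "=", "<", ">"]) label
  let toks := all_tokens.map (fun t => if PySem.Str.strIsdigit t then ":" else t)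
  let cleaned := List.foldl pvWhileRemove toks keywords
  let counts := PySem.Dict.counter cleaned
  match PySem.List.min? counts.values (fun v => v) with
  | none => none                                   -- len(values) == 0
  | some m => if 1 < m then none else some counts.items

-- ===== PORT B =====
def process_alt (icg : List (List String)) (label : List String) : Option (List (String × Int)) :=
  let counts := PySem.Dict.counter
      (icg.flatMap (fun row => row.map (fun t => if PySem.Str.strIsdigit t then ":" else t)))
  let counts2 := List.foldl PySem.Dict.erase counts
      (PySem.Set.union (PySem.Set.ofList ["not", "if", "goto", ":", "=", "<", ">"]) label)
  if PySem.Dict.size counts2 = 0 then none         -- 'not counts'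
  else
    match PySem.List.min? counts2.values (fun v => v) with
    | none => none
    | some m => if 1 < m then none else some counts2.items

-- ===== PRECONDITION & SPEC =====
def Spec_process (icg : List (List String)) (label : List String) (out : Option (List (String × Int))) : Prop := out = process_alt icg label
instance (icg : List (List String)) (label : List String) (out : Option (List (String × Int))) : Decidable (Spec_process icg label out) := by unfold Spec_process; infer_instance

-- ===== CLAIM (what is proved, stated in full; the proofs are below) =====
def Claim_equal_process : Prop := ∀ (icg : List (List String)) (label : List String), Dom_process icg label → Spec_process icg label (process icg label)

-- ===== LEMMAS AND PROOFS =====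

lemma pv_filter_erase_self (kw : String) (xs : List String) :
    (xs.erase kw).filter (fun t => !(t == kw)) = xs.filter (fun t => !(t == kw)) := by
  induction xs with
  | nil => rfl
  | cons x xs ih =>
    by_cases hx : x = kw
    · subst hx; simp [List.erase_cons]
    · simp only [List.erase_cons, beq_iff_eq, if_neg hx, List.filter_cons]
      have : (!(x == kw)) = true := by simp [hx]
      simp [this, ih]

lemma pv_whileRemove_eq_filter (xs : List String) (kw : String) :
    pvWhileRemove xs kw = xs.filter (fun t => !(t == kw)) := by
  induction hn : xs.length using Nat.strong_induction_on generalizing xs with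
  | _ n ih =>
  rw [pvWhileRemove]
  split
  · next h =>
    have hnot : kw ∉ xs := (PySem.List.remove?_eq_none_iff xs kw).mp h
    refine (List.filter_eq_self.mpr ?_).symm
    intro t ht
    simp only [Bool.not_eq_eq_eq_not, Bool.not_true, beq_eq_false_iff_ne]
    exact fun hteq => hnot (hteq ▸ ht)
  · next ys h =>
    have hmem : kw ∈ xs := by
      by_contra hc
      rw [(PySem.List.remove?_eq_none_iff xs kw).mpr hc] at h
      simp at h
    rw [PySem.List.remove?_eq_some_erase xs kw hmem] at h
    cases h
    have h1 : 0 < xs.length := List.length_pos_of_mem hmem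
    have h2 := List.length_erase_of_mem hmem
    subst hn
    rw [ih (xs.erase kw).length (by omega) _ rfl]
    exact pv_filter_erase_self kw xs

lemma pv_foldl_whileRemove (ks : List String) (xs : List String) :
    List.foldl pvWhileRemove xs ks = xs.filter (fun t => !(ks.contains t)) := by
  induction ks generalizing xs with
  | nil => simp
  | cons k ks ih =>
    simp only [List.foldl_cons]
    rw [ih, pv_whileRemove_eq_filter, List.filter_filter]
    refine List.filter_congr ?_
    intro t _
    simp [Bool.not_or, Bool.and_comm, beq_eq_decide]

lemma pv_filter_foldl_add (p : String → Bool) (xs acc : List String) :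
    ((List.foldl PySem.Set.add acc xs).filter p) =
      List.foldl PySem.Set.add (acc.filter p) (xs.filter p) := by
  induction xs generalizing acc with
  | nil => simp
  | cons x xs ih =>
    have key : List.filter p (PySem.Set.add acc x) =
        if p x = true then PySem.Set.add (List.filter p acc) x else List.filter p acc := by
      unfold PySem.Set.add PySem.Set.contains
      by_cases hm : x ∈ acc <;> by_cases hp : p x = true <;>
        simp [hm, hp, List.filter_append, List.mem_filter]
    simp only [List.foldl_cons]
    rw [ih, key]
    by_cases hp : p x = true
    · simp [List.filter_cons, hp]
    · simp [List.filter_cons, hp]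

lemma pv_ofList_filter (p : String → Bool) (xs : List String) :
    PySem.Set.ofList (xs.filter p) = (PySem.Set.ofList xs).filter p := by
  unfold PySem.Set.ofList
  rw [pv_filter_foldl_add]
  rfl

lemma pv_items_foldl_erase (ks : List String) (d : PySem.Dict String Int) :
    (List.foldl PySem.Dict.erase d ks).items = d.items.filter (fun p => !(ks.contains p.1)) := by
  induction ks generalizing d with
  | nil => simp
  | cons k ks ih =>
    simp only [List.foldl_cons]
    rw [ih]
    show ((PySem.Dict.erase d k).items).filter _ = _
    unfold PySem.Dict.erase
    simp only [List.filter_filter]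
    refine List.filter_congr ?_
    intro p _
    simp [Bool.not_or, Bool.and_comm, beq_eq_decide]

lemma pv_counter_filter (ks : List String) (xs : List String) :
    PySem.Dict.counter (xs.filter (fun t => !(ks.contains t))) =
      List.foldl PySem.Dict.erase (PySem.Dict.counter xs) ks := by
  apply PySem.Dict.ext
  rw [pv_items_foldl_erase, PySem.Dict.items_counter, PySem.Dict.items_counter]
  rw [List.filter_map]
  have hcomp : ((fun p : String × Int => !(ks.contains p.1)) ∘ (fun k => (k, (List.count k xs : Int))))
      = fun t => !(ks.contains t) := rfl
  rw [hcomp, pv_ofList_filter]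
  refine List.map_congr_left ?_
  intro k hk
  have hpk : (!(ks.contains k)) = true := (List.mem_filter.mp hk).2
  congr 1
  exact_mod_cast List.count_filter (p := fun t => !(ks.contains t)) (a := k) (l := xs) hpk

lemma pv_tokens_eq (icg : List (List String)) :
    (((PySem.List.pyRange 0 (PySem.List.len icg)).foldl
        (fun acc i => acc ++ PySem.List.pyGetD icg i []) []).map
        (fun t => if PySem.Str.strIsdigit t then ":" else t)) =
      icg.flatMap (fun row => row.map (fun t => if PySem.Str.strIsdigit t then ":" else t)) := by
  rw [PySem.List.foldl_pyRange_zero_pyGetD icg [] (fun acc row => acc ++ row) []]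
  rw [PySem.List.foldl_append_eq_flatMap (fun row => row) icg []]
  simp only [List.nil_append]
  rw [List.map_flatMap]

-- ===== VERDICT (by name: the statement is the Claim_ definition above) =====
theorem process_spec : Claim_equal_process := by
  intro icg label _
  unfold Spec_process process process_alt
  simp only []
  rw [pv_tokens_eq, pv_foldl_whileRemove, pv_counter_filter]
  set d := List.foldl PySem.Dict.erase
      (PySem.Dict.counter (icg.flatMap (fun row => row.map (fun t => if PySem.Str.strIsdigit t then ":" else t))))
      (PySem.Set.union (PySem.Set.ofList ["not", "if", "goto", ":", "=", "<", ">"]) label) with hd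
  rcases hitems : d.items with _ | ⟨⟨k, v⟩, rest⟩
  · have hvals : d.values = [] := by simp [PySem.Dict.values, hitems]
    have hsize : PySem.Dict.size d = 0 := by simp [PySem.Dict.size, hitems]
    simp [hvals, hsize, PySem.List.min?]
  · have hsize : PySem.Dict.size d ≠ 0 := by simp [PySem.Dict.size, hitems]
    rw [if_neg hsize]
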